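-- pv_equiv track=rewrite | github.com/evan-zhang/agent-factory | projects/2604241/pharma-evidence-audit-loop/scripts/audit/audit_run.py | next_action_for_codes
-- ===== SOURCE A (Python) =====
-- def next_action_for_codes(codes: list[str]) -> str:
--     if any(c == "E_COUNTER_CHECK_MISSING" for c in codes):
--         return "补检"
--     if any(c in ("E_INSUFFICIENT_EVIDENCE", "E_SOURCE_GRADE_LOW", "E_NO_QUOTE", "E_NO_SOURCE_URL") for c in codes):
--         return "补检"
--     if any(c == "E_DEDUP_COLLISION" for c in codes):
--         return "人工"
--     return "收口"
-- ===== SOURCE B (Python) =====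
-- _RANK = {
--     "E_COUNTER_CHECK_MISSING": 0,
--     "E_INSUFFICIENT_EVIDENCE": 0,
--     "E_SOURCE_GRADE_LOW": 0,
--     "E_NO_QUOTE": 0,
--     "E_NO_SOURCE_URL": 0,
--     "E_DEDUP_COLLISION": 1,
-- }
--
--
-- def next_action_for_codes(codes: list[str]) -> str:
--     rank = 2
--     for c in codes:
--         rank = min(rank, _RANK.get(c, 2))
--     if rank == 0:
--         return "补检"
--     if rank == 1:
--         return "人工"
--     return "收口"
-- ===== Notes on version B (the rewrite author's own statement) =====
-- stated objective: alternative
-- what changed: Replaced three separate any-scans over the codes list by a priority table (code -> rank) and one single pass keeping the minimum rank, then mapping the final rank to its action.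
import Mathlib
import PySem

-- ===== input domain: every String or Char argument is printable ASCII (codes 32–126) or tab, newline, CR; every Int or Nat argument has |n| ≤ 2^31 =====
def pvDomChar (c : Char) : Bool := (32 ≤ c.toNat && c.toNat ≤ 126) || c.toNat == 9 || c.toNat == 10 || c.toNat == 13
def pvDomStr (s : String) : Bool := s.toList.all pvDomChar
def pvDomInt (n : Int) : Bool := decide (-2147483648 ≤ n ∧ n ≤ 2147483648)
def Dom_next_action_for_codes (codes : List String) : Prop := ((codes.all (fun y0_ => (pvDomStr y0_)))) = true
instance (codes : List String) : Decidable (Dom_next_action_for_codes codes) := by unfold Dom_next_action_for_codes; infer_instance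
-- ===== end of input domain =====

-- B replaces A's three any-scans by one min-rank pass over a priority table (alternative decomposition; same cost).

-- ===== PORT A =====
def next_action_for_codes (codes : List String) : String :=
  if codes.any (fun c => c == "E_COUNTER_CHECK_MISSING") then "补检"
  else if codes.any (fun c =>
      c == "E_INSUFFICIENT_EVIDENCE" || c == "E_SOURCE_GRADE_LOW" ||
      c == "E_NO_QUOTE" || c == "E_NO_SOURCE_URL") then "补检"
  else if codes.any (fun c => c == "E_DEDUP_COLLISION") then "人工"
  else "收口"

-- ===== PORT B =====
def pvRankTable : PySem.Dict String Int :=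
  PySem.Dict.ofList
    [("E_COUNTER_CHECK_MISSING", 0), ("E_INSUFFICIENT_EVIDENCE", 0),
     ("E_SOURCE_GRADE_LOW", 0), ("E_NO_QUOTE", 0), ("E_NO_SOURCE_URL", 0),
     ("E_DEDUP_COLLISION", 1)]

def next_action_for_codes_alt (codes : List String) : String :=
  let rank := codes.foldl (fun r c => min r (pvRankTable.getD c 2)) 2
  if rank = 0 then "补检"
  else if rank = 1 then "人工"
  else "收口"

-- ===== PRECONDITION & SPEC =====
def Spec_next_action_for_codes (codes : List String) (out : String) : Prop := out = next_action_for_codes_alt codes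
instance (codes : List String) (out : String) : Decidable (Spec_next_action_for_codes codes out) := by unfold Spec_next_action_for_codes; infer_instance

-- ===== CLAIM (what is proved, stated in full; the proofs are below) =====
def Claim_equal_next_action_for_codes : Prop := ∀ (codes : List String), Dom_next_action_for_codes codes → Spec_next_action_for_codes codes (next_action_for_codes codes)

-- ===== LEMMAS AND PROOFS =====

-- the fold of B, as a named function for the lemmas
def pvRank (codes : List String) : Int :=
  codes.foldl (fun r c => min r (pvRankTable.getD c 2)) 2

-- one table lookup, characterized by the same string tests A performs
theorem pvEntry_eq (c : String) :
    pvRankTable.getD c 2 =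
      if (c == "E_COUNTER_CHECK_MISSING" ||
          (c == "E_INSUFFICIENT_EVIDENCE" || c == "E_SOURCE_GRADE_LOW" ||
           c == "E_NO_QUOTE" || c == "E_NO_SOURCE_URL")) then 0
      else if c == "E_DEDUP_COLLISION" then 1 else 2 := by
  have htab : pvRankTable = PySem.Dict.mk
      [("E_COUNTER_CHECK_MISSING", 0), ("E_INSUFFICIENT_EVIDENCE", 0),
       ("E_SOURCE_GRADE_LOW", 0), ("E_NO_QUOTE", 0), ("E_NO_SOURCE_URL", 0),
       ("E_DEDUP_COLLISION", 1)] := by decide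
  simp only [htab, PySem.Dict.getD, PySem.Dict.get?_mk_cons, beq_iff_eq, Bool.or_eq_true]
  by_cases h1 : c = "E_COUNTER_CHECK_MISSING" <;>
  by_cases h2 : c = "E_INSUFFICIENT_EVIDENCE" <;>
  by_cases h3 : c = "E_SOURCE_GRADE_LOW" <;>
  by_cases h4 : c = "E_NO_QUOTE" <;>
  by_cases h5 : c = "E_NO_SOURCE_URL" <;>
  by_cases h6 : c = "E_DEDUP_COLLISION" <;>
    simp [h1, h2, h3, h4, h5, h6, eq_comm, PySem.Dict.get?]

theorem pvEntry_le_two (c : String) : pvRankTable.getD c 2 ≤ 2 := by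
  rw [pvEntry_eq]; split_ifs <;> omega

theorem pvFold_min (codes : List String) (r : Int) (h : r ≤ 2) :
    codes.foldl (fun r c => min r (pvRankTable.getD c 2)) r = min r (pvRank codes) := by
  induction codes generalizing r with
  | nil => simp [pvRank]; omega
  | cons c cs ih =>
    have hc := pvEntry_le_two c
    simp only [List.foldl_cons, pvRank]
    rw [ih _ (by omega), ih _ (by omega)]
    omega

theorem pvRank_cons (c : String) (codes : List String) :
    pvRank (c :: codes) = min (pvRankTable.getD c 2) (pvRank codes) := by
  have hc := pvEntry_le_two c
  have h1 : pvRank (c :: codes) =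
      codes.foldl (fun r c => min r (pvRankTable.getD c 2)) (min 2 (pvRankTable.getD c 2)) := rfl
  rw [h1, pvFold_min _ _ (by omega)]
  omega

-- the minimum rank, characterized by A's three any-scans
theorem pvRank_eq (codes : List String) :
    pvRank codes =
      if codes.any (fun c => c == "E_COUNTER_CHECK_MISSING") then 0
      else if codes.any (fun c =>
          c == "E_INSUFFICIENT_EVIDENCE" || c == "E_SOURCE_GRADE_LOW" ||
          c == "E_NO_QUOTE" || c == "E_NO_SOURCE_URL") then 0
      else if codes.any (fun c => c == "E_DEDUP_COLLISION") then 1 else 2 := by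
  induction codes with
  | nil => simp [pvRank]
  | cons c cs ih =>
    rw [pvRank_cons, ih, pvEntry_eq]
    simp only [List.any_cons, Bool.or_eq_true]
    split_ifs <;> first
      | rfl | omega | (simp_all; done)
      | (simp_all
         obtain ⟨x, hx, h2⟩ :=
           ‹∃ x ∈ cs, ((x = "E_INSUFFICIENT_EVIDENCE" ∨ x = "E_SOURCE_GRADE_LOW") ∨ x = "E_NO_QUOTE") ∨ x = "E_NO_SOURCE_URL"›
         have := ‹∀ x ∈ cs, ((¬x = "E_INSUFFICIENT_EVIDENCE" ∧ ¬x = "E_SOURCE_GRADE_LOW") ∧ ¬x = "E_NO_QUOTE") ∧ ¬x = "E_NO_SOURCE_URL"› x hx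
         tauto)

-- ===== VERDICT (by name: the statement is the Claim_ definition above) =====
theorem next_action_for_codes_spec : Claim_equal_next_action_for_codes := by
  intro codes _
  show next_action_for_codes codes = next_action_for_codes_alt codes
  rw [next_action_for_codes_alt, next_action_for_codes]
  rw [show codes.foldl (fun r c => min r (pvRankTable.getD c 2)) 2 = pvRank codes from rfl,
    pvRank_eq]
  split_ifs <;> simp_all
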